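-- pv_equiv track=rewrite | github.com/m-check1B/mono-applications | previous-gen-apps/focus-kraliki/backend/app/core/i18n.py | get_i18n_value
-- ===== SOURCE A (Python) =====
-- from typing import Optional, Dict, Any
--
-- def get_i18n_value(
--     i18n_dict: Optional[Dict[str, str]],
--     locale: str,
--     fallback_value: Optional[str] = None
-- ) -> Optional[str]:
--     """
--     Get localized value from i18n JSONB field.
--
--     Args:
--         i18n_dict: JSONB dict with locale keys (e.g., {'en': 'Task', 'cs': 'Úkol'})
--         locale: Requested locale ('en' or 'cs')
--         fallback_value: Value to return if i18n_dict is None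
--
--     Returns:
--         Localized string or fallback value
--
--     Examples:
--         >>> get_i18n_value({'en': 'Task', 'cs': 'Úkol'}, 'cs')
--         'Úkol'
--
--         >>> get_i18n_value({'en': 'Task'}, 'cs')
--         'Task'  # Falls back to English
--
--         >>> get_i18n_value(None, 'cs', 'Default Task')
--         'Default Task'
--     """
--     if not i18n_dict:
--         return fallback_value
--
--     # Try requested locale
--     if locale in i18n_dict and i18n_dict[locale]:
--         return i18n_dict[locale]
--
--     # Fall back to English
--     if "en" in i18n_dict and i18n_dict["en"]:
--         return i18n_dict["en"]
--
--     # Fall back to any available locale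
--     for value in i18n_dict.values():
--         if value:
--             return value
--
--     return fallback_value
-- ===== SOURCE B (Python) =====
-- def get_i18n_value(i18n_dict, locale, fallback_value=None):
--     if not i18n_dict:
--         return fallback_value
--     best = None  # (rank, value) with the smallest rank seen so far; first occurrence wins ties
--     for key, value in i18n_dict.items():
--         if not value:
--             continue
--         rank = 0 if key == locale else 1 if key == "en" else 2
--         if best is None or rank < best[0]:
--             best = (rank, value)
--     return best[1] if best is not None else fallback_value
-- ===== Notes on version B (the rewrite author's own statement) =====
-- stated objective: alternative
-- what changed: Replaces A's staged lookups (locale, then 'en', then a values loop) by one single pass over the items that scores each truthy entry with a priority rank (0=locale, 1='en', 2=other) and keeps the first entry of strictly smallest rank, returning its value.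
import Mathlib
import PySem

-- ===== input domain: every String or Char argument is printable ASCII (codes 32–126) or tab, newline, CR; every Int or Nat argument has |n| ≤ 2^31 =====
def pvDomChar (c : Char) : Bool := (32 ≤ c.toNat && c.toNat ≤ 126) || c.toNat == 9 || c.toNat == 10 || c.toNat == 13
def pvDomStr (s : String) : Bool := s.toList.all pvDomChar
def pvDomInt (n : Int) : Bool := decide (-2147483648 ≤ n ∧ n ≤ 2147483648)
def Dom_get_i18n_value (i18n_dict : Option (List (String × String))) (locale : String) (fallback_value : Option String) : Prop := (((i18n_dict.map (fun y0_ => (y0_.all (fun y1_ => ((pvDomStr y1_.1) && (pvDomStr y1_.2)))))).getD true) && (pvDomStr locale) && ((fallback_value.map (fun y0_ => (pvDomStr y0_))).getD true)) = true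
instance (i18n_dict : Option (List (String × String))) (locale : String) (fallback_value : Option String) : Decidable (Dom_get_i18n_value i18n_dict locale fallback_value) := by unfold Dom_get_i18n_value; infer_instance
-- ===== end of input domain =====

-- B replaces A's staged lookups (locale, then "en", then a values loop) by one single pass that
-- ranks every truthy entry (0 = locale, 1 = "en", 2 = other) and keeps the first entry of
-- strictly smallest rank (alternative algorithm, same cost).


-- ===== PORT A =====
-- 'k in d and d[k]' then 'return d[k]': the looked-up value when it is non-empty ("truthy")
def pvTruthyLookup (d : List (String × String)) (k : String) : Option String :=
  match d.lookup k with
  | some v => if v = "" then none else some v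
  | none => none

-- 'for value in i18n_dict.values(): if value: return value'
def pvFirstTruthy : List (String × String) → Option String
  | [] => none
  | (_, v) :: rest => if v ≠ "" then some v else pvFirstTruthy rest

def get_i18n_value (i18n_dict : Option (List (String × String))) (locale : String) (fallback_value : Option String) : Option String :=
  match i18n_dict with
  | none => fallback_value
  | some d =>
    if d = [] then fallback_value           -- 'if not i18n_dict'
    else
      match pvTruthyLookup d locale with    -- try requested locale
      | some v => some v
      | none =>
        match pvTruthyLookup d "en" with    -- fall back to English
        | some v => some v
        | none =>
          match pvFirstTruthy d with        -- fall back to any available locale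
          | some v => some v
          | none => fallback_value

-- ===== PORT B =====
-- loop body: skip falsy values; rank the key; keep the accumulator unless the new rank is strictly smaller
def pvBestStep (locale : String) (best : Option (Nat × String)) (kv : String × String) : Option (Nat × String) :=
  if kv.2 = "" then best
  else
    let rank : Nat := if kv.1 = locale then 0 else if kv.1 = "en" then 1 else 2
    match best with
    | none => some (rank, kv.2)
    | some b => if rank < b.1 then some (rank, kv.2) else best

def get_i18n_value_alt (i18n_dict : Option (List (String × String))) (locale : String) (fallback_value : Option String) : Option String :=
  match i18n_dict with
  | none => fallback_value
  | some d =>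
    if d = [] then fallback_value           -- 'if not i18n_dict'
    else
      match d.foldl (pvBestStep locale) none with
      | some b => some b.2
      | none => fallback_value

-- ===== PRECONDITION & SPEC =====
-- Pre_ excludes association lists with duplicate keys: those represent no Python dict (dict keys
-- are unique), so no input on which the Python A returns is excluded.
def Pre_get_i18n_value (i18n_dict : Option (List (String × String))) (locale : String) (fallback_value : Option String) : Prop :=
  ((i18n_dict.getD []).map Prod.fst).Nodup
instance (i18n_dict : Option (List (String × String))) (locale : String) (fallback_value : Option String) : Decidable (Pre_get_i18n_value i18n_dict locale fallback_value) := by unfold Pre_get_i18n_value; infer_instance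

def pvWitness_get_i18n_value : (Option (List (String × String))) × String × Option String :=
  (some [("en", "Task"), ("cs", "Ukol")], "cs", some "Default")

def Spec_get_i18n_value (i18n_dict : Option (List (String × String))) (locale : String) (fallback_value : Option String) (out : Option String) : Prop := out = get_i18n_value_alt i18n_dict locale fallback_value
instance (i18n_dict : Option (List (String × String))) (locale : String) (fallback_value : Option String) (out : Option String) : Decidable (Spec_get_i18n_value i18n_dict locale fallback_value out) := by unfold Spec_get_i18n_value; infer_instance

-- ===== CLAIM (what is proved, stated in full; the proofs are below) =====
def Claim_equal_get_i18n_value : Prop := ∀ (i18n_dict : Option (List (String × String))) (locale : String) (fallback_value : Option String), Dom_get_i18n_value i18n_dict locale fallback_value → Pre_get_i18n_value i18n_dict locale fallback_value → Spec_get_i18n_value i18n_dict locale fallback_value (get_i18n_value i18n_dict locale fallback_value)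

-- ===== LEMMAS AND PROOFS =====

-- Merge of two partial "best" results: left-biased minimum on the rank.
def pvMerge : Option (Nat × String) → Option (Nat × String) → Option (Nat × String)
  | none, b => b
  | some a, none => some a
  | some a, some b => if b.1 < a.1 then some b else some a

-- The first truthy value whose key is neither the locale nor "en" (rank-2 candidates).
def pvFirstTruthyOther (locale : String) : List (String × String) → Option String
  | [] => none
  | (k, v) :: rest =>
    if v ≠ "" ∧ k ≠ locale ∧ k ≠ "en" then some v else pvFirstTruthyOther locale rest

-- One loop step is a merge with the entry's rank (none if the value is falsy).
theorem pvBestStep_eq_merge (locale : String) (best : Option (Nat × String)) (kv : String × String) :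
    pvBestStep locale best kv =
      pvMerge best (if kv.2 = "" then none
        else some ((if kv.1 = locale then 0 else if kv.1 = "en" then 1 else 2), kv.2)) := by
  unfold pvBestStep pvMerge
  by_cases h : kv.2 = "" <;> cases best <;> simp [h]

theorem pvMerge_assoc (a b c : Option (Nat × String)) :
    pvMerge (pvMerge a b) c = pvMerge a (pvMerge b c) := by
  rcases a with _ | a <;> rcases b with _ | b <;> rcases c with _ | c <;>
    try rfl
  · by_cases h : b.1 < a.1 <;> simp [pvMerge, h]
  · by_cases h1 : b.1 < a.1 <;> by_cases h2 : c.1 < b.1 <;> by_cases h3 : c.1 < a.1 <;>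
      simp [pvMerge, h1, h2, h3] <;> omega

-- Folding from any accumulator is the accumulator merged with the fold from none.
theorem pvFoldl_merge (locale : String) (acc : Option (Nat × String)) (d : List (String × String)) :
    d.foldl (pvBestStep locale) acc = pvMerge acc (d.foldl (pvBestStep locale) none) := by
  induction d generalizing acc with
  | nil => cases acc <;> rfl
  | cons p rest ih =>
    simp only [List.foldl_cons]
    rw [ih (pvBestStep locale acc p), ih (pvBestStep locale none p),
      pvBestStep_eq_merge, pvBestStep_eq_merge, pvMerge_assoc]
    rfl

theorem pvTruthyLookup_not_mem (d : List (String × String)) (k : String)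
    (h : k ∉ d.map Prod.fst) : pvTruthyLookup d k = none := by
  induction d with
  | nil => rfl
  | cons p rest ih =>
    obtain ⟨a, b⟩ := p
    rw [List.map_cons, List.mem_cons, not_or] at h
    have hb : (k == a) = false := beq_eq_false_iff_ne.mpr h.1
    simp only [pvTruthyLookup, List.lookup, hb]
    exact ih h.2

theorem pvTruthyLookup_cons (k v x : String) (rest : List (String × String)) :
    pvTruthyLookup ((k, v) :: rest) x =
      if k = x then (if v = "" then none else some v) else pvTruthyLookup rest x := by
  by_cases hkx : k = x
  · subst hkx; simp [pvTruthyLookup, List.lookup]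
  · have hb : (x == k) = false := beq_eq_false_iff_ne.mpr (Ne.symm hkx)
    simp [pvTruthyLookup, List.lookup, hb, hkx]

theorem pvMerge_none (X : Option (Nat × String)) : pvMerge none X = X := rfl

-- A rank-0 entry can never be displaced.
theorem pvMerge_zero (v : String) (X : Option (Nat × String)) :
    pvMerge (some (0, v)) X = some (0, v) := by
  cases X <;> simp [pvMerge]

-- Characterisation of B's fold on duplicate-free dicts: the requested locale wins if truthy,
-- else "en" (when distinct from the locale), else the first other truthy entry.
theorem pvBestOf_eq (locale : String) (d : List (String × String))
    (hnd : (d.map Prod.fst).Nodup) :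
    d.foldl (pvBestStep locale) none =
      match pvTruthyLookup d locale with
      | some u => some (0, u)
      | none =>
        match (if locale = "en" then none else pvTruthyLookup d "en") with
        | some u => some (1, u)
        | none => (pvFirstTruthyOther locale d).map (fun v => (2, v)) := by
  induction d with
  | nil => simp [pvTruthyLookup, pvFirstTruthyOther]
  | cons p rest ih =>
    obtain ⟨k, v⟩ := p
    rw [List.map_cons, List.nodup_cons] at hnd
    rw [List.foldl_cons, pvFoldl_merge, ih hnd.2, pvBestStep_eq_merge]
    by_cases hv : v = ""
    · -- falsy head: the entry contributes nothing and every cons-lookup defers to the tail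
      subst hv
      have hcx : ∀ x, pvTruthyLookup ((k, "") :: rest) x = pvTruthyLookup rest x := by
        intro x
        rw [pvTruthyLookup_cons]
        by_cases hkx : k = x
        · rw [if_pos hkx, if_pos rfl, pvTruthyLookup_not_mem rest x (hkx ▸ hnd.1)]
        · rw [if_neg hkx]
      simp [hcx, pvMerge, pvFirstTruthyOther]
    · by_cases hkl : k = locale
      · -- rank 0: always wins
        simp [pvTruthyLookup_cons, hkl, hv, pvMerge_none, pvMerge_zero]
      · by_cases hke : k = "en"
        · -- rank 1 (locale ≠ "en" since k ≠ locale): beaten only by a rank-0 entry in the tail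
          have hle : locale ≠ "en" := fun e => hkl (hke.trans e.symm)
          have hre : pvTruthyLookup rest "en" = none :=
            pvTruthyLookup_not_mem rest "en" (by rw [← hke]; exact hnd.1)
          have hle' : ¬("en" = locale) := fun e => hle e.symm
          cases hrl : pvTruthyLookup rest locale with
          | some u => simp [pvTruthyLookup_cons, hrl, hre, hkl, hke, hle, hle', hv, pvMerge_none, pvMerge]
          | none =>
            cases pvFirstTruthyOther locale rest <;>
              simp [pvTruthyLookup_cons, hrl, hre, hkl, hke, hle, hle', hv, pvMerge_none, pvMerge]
        · -- rank 2: beaten by any rank-0 or rank-1 entry; among rank 2 the first occurrence wins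
          cases hrl : pvTruthyLookup rest locale with
          | some u => simp [pvTruthyLookup_cons, hrl, hkl, hke, hv, pvMerge_none, pvMerge]
          | none =>
            by_cases hle : locale = "en"
            · subst hle
              cases pvFirstTruthyOther "en" rest <;>
                simp [pvTruthyLookup_cons, hrl, hkl, hke, hv, pvMerge_none, pvMerge, pvFirstTruthyOther]
            · cases hren : pvTruthyLookup rest "en" with
              | some u => simp [pvTruthyLookup_cons, hrl, hren, hkl, hke, hle, hv, pvMerge_none, pvMerge, pvFirstTruthyOther]
              | none =>
                cases pvFirstTruthyOther locale rest <;>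
                  simp [pvTruthyLookup_cons, hrl, hren, hkl, hke, hle, hv, pvMerge_none, pvMerge, pvFirstTruthyOther]

-- When neither the locale nor "en" has a truthy value, A's values loop only ever
-- returns rank-2 entries.
theorem pvFirstTruthy_eq_other (locale : String) (d : List (String × String))
    (hnd : (d.map Prod.fst).Nodup)
    (h0 : pvTruthyLookup d locale = none) (h1 : pvTruthyLookup d "en" = none) :
    pvFirstTruthy d = pvFirstTruthyOther locale d := by
  induction d with
  | nil => rfl
  | cons p rest ih =>
    obtain ⟨k, v⟩ := p
    rw [List.map_cons, List.nodup_cons] at hnd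
    rw [pvTruthyLookup_cons] at h0 h1
    by_cases hv : v = ""
    · have h0' : pvTruthyLookup rest locale = none := by
        by_cases hkl : k = locale
        · exact pvTruthyLookup_not_mem rest locale (by rw [← hkl]; exact hnd.1)
        · simpa [hkl] using h0
      have h1' : pvTruthyLookup rest "en" = none := by
        by_cases hke : k = "en"
        · exact pvTruthyLookup_not_mem rest "en" (by rw [← hke]; exact hnd.1)
        · simpa [hke] using h1
      simp [pvFirstTruthy, pvFirstTruthyOther, hv, ih hnd.2 h0' h1']
    · have hkl : k ≠ locale := by
        intro e; rw [if_pos e, if_neg hv] at h0; exact absurd h0 (by simp)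
      have hke : k ≠ "en" := by
        intro e; rw [if_pos e, if_neg hv] at h1; exact absurd h1 (by simp)
      simp [pvFirstTruthy, pvFirstTruthyOther, hv, hkl, hke]

-- ===== VERDICT (by name: the statement is the Claim_ definition above) =====
theorem get_i18n_value_spec : Claim_equal_get_i18n_value := by
  intro i18n_dict locale fallback_value _ hpre
  unfold Spec_get_i18n_value get_i18n_value get_i18n_value_alt
  cases i18n_dict with
  | none => rfl
  | some d =>
    by_cases hd : d = []
    · simp [hd]
    · have hnd : (d.map Prod.fst).Nodup := by simpa [Pre_get_i18n_value] using hpre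
      simp only [hd, ite_false]
      rw [pvBestOf_eq locale d hnd]
      cases h0 : pvTruthyLookup d locale with
      | some u => rfl
      | none =>
        by_cases hle : locale = "en"
        · rw [if_pos hle]
          have h1 : pvTruthyLookup d "en" = none := hle ▸ h0
          rw [h1, pvFirstTruthy_eq_other locale d hnd h0 h1]
          cases pvFirstTruthyOther locale d <;> rfl
        · rw [if_neg hle]
          cases h1 : pvTruthyLookup d "en" with
          | some u => rfl
          | none =>
            rw [pvFirstTruthy_eq_other locale d hnd h0 h1]
            cases pvFirstTruthyOther locale d <;> rfl
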